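-- pv_equiv track=rewrite | github.com/impradeeparya/python-getting-started | array/DiagonalTraverse.py | findDiagonalOrder_v1
-- ===== SOURCE A (Python) =====
-- def findDiagonalOrder_v1(nums):
--     output = []
--     rows = len(nums)
--
--     max_columns = 0
--     for row in range(rows):
--         if len(nums[row]) > max_columns:
--             max_columns = len(nums[row])
--
--     for row in range(rows):
--         x = row
--         y = 0
--         while x >= 0:
--             if len(nums[x]) > y:
--                 output.append(nums[x][y])
--             x = x - 1
--             y = y + 1
--
--     for column in range(1, max_columns):
--         x = rows - 1
--         y = column
--         while y < max_columns and x >= 0: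
--             if len(nums[x]) > y:
--                 output.append(nums[x][y])
--             x = x - 1
--             y = y + 1
--
--     return output
-- ===== SOURCE B (Python) =====
-- def findDiagonalOrder_v1(nums):
--     rows = len(nums)
--     max_columns = max(map(len, nums), default=0)
--     ndiag = rows + max_columns - 1 if nums else 0
--     buckets = [[] for _ in range(ndiag)]
--     for x in range(rows - 1, -1, -1):
--         for y, v in enumerate(nums[x]):
--             buckets[x + y].append(v)
--     output = []
--     for b in buckets:
--         output += b
--     return output
-- ===== Notes on version B (the rewrite author's own statement) =====
-- stated objective: faster
-- what changed: Replaces the two-phase diagonal walks (one while-walk per starting row and per starting column, probing many (x,y) cells that do not exist in jagged input) by a single pass that buckets every existing element into its anti-diagonal x+y (iterating rows bottom-up so each bucket is already in decreasing-row order) and then concatenates the buckets.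
import Mathlib
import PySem

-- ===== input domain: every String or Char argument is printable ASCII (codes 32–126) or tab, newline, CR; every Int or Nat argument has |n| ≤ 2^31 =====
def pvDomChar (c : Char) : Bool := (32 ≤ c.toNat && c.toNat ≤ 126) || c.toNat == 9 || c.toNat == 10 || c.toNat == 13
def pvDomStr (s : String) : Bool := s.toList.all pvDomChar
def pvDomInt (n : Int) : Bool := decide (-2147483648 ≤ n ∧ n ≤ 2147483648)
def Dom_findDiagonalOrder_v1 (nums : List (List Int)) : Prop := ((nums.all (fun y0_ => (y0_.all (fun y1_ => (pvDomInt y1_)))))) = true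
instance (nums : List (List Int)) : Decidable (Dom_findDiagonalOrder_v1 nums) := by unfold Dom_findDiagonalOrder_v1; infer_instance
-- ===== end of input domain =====

-- B replaces A's two-phase per-start diagonal walks by one pass that buckets each
-- existing element into its anti-diagonal x+y (rows visited bottom-up) and
-- concatenates the buckets.

-- ===== PORT A =====
-- while x >= 0: if len(nums[x]) > y: output.append(nums[x][y]); x -= 1; y += 1
-- (call sites keep 0 ≤ x < len nums and 0 ≤ y, so getD x.toNat / y.toNat is exact there)
def pvWalk1 (nums : List (List Int)) (x y : Int) : List Int :=
  if _hx : 0 ≤ x then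
    (if ((nums.getD x.toNat []).length : Int) > y then [(nums.getD x.toNat []).getD y.toNat 0] else [])
      ++ pvWalk1 nums (x - 1) (y + 1)
  else []
termination_by (x + 1).toNat
decreasing_by omega

-- while y < max_columns and x >= 0: … (same body as pvWalk1)
def pvWalk2 (nums : List (List Int)) (maxc : Int) (x y : Int) : List Int :=
  if _hx : y < maxc ∧ 0 ≤ x then
    (if ((nums.getD x.toNat []).length : Int) > y then [(nums.getD x.toNat []).getD y.toNat 0] else [])
      ++ pvWalk2 nums maxc (x - 1) (y + 1)
  else []
termination_by (x + 1).toNat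
decreasing_by omega

def findDiagonalOrder_v1 (nums : List (List Int)) : List Int :=
  let rows := nums.length
  let maxc := (List.range rows).foldl
    (fun m row => if (nums.getD row []).length > m then (nums.getD row []).length else m) 0
  let out1 := (List.range rows).foldl (fun acc (row : Nat) => acc ++ pvWalk1 nums (row : Int) 0) []
  let out2 := (List.range' 1 (maxc - 1)).foldl
    (fun acc (col : Nat) => acc ++ pvWalk2 nums (maxc : Int) ((rows : Int) - 1) (col : Int)) []
  out1 ++ out2

-- ===== PORT B =====
def findDiagonalOrder_v1_alt (nums : List (List Int)) : List Int :=
  let rows := nums.length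
  let maxc := nums.foldl (fun m r => max m r.length) 0      -- max(map(len, nums), default=0)
  let ndiag := if nums = [] then 0 else rows + maxc - 1
  let buckets := (PySem.List.pyRange ((rows : Int) - 1) (-1) (-1)).foldl
    (fun bs x =>
      (PySem.List.enumerate (PySem.List.pyGetD nums x []) 0).foldl
        (fun bs2 p => bs2.set (x + p.1).toNat ((bs2.getD (x + p.1).toNat []) ++ [p.2])) bs)
    (List.replicate ndiag ([] : List Int))
  buckets.foldl (fun out b => out ++ b) []

-- ===== PRECONDITION & SPEC =====
def Spec_findDiagonalOrder_v1 (nums : List (List Int)) (out : List Int) : Prop := out = findDiagonalOrder_v1_alt nums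
instance (nums : List (List Int)) (out : List Int) : Decidable (Spec_findDiagonalOrder_v1 nums out) := by unfold Spec_findDiagonalOrder_v1; infer_instance

-- ===== CLAIM (what is proved, stated in full; the proofs are below) =====
def Claim_equal_findDiagonalOrder_v1 : Prop := ∀ (nums : List (List Int)), Dom_findDiagonalOrder_v1 nums → Spec_findDiagonalOrder_v1 nums (findDiagonalOrder_v1 nums)

-- ===== LEMMAS AND PROOFS =====

-- the element of nums on anti-diagonal d contributed by row x, if any
def pvCell (nums : List (List Int)) (d x : Nat) : Option Int :=
  if x ≤ d ∧ d - x < (nums.getD x []).length then some ((nums.getD x []).getD (d - x) 0) else none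

-- anti-diagonal d, listed in decreasing row order
def pvDiag (nums : List (List Int)) (d : Nat) : List Int :=
  ((List.range nums.length).reverse).filterMap (pvCell nums d)

def pvMaxLen (nums : List (List Int)) : Nat := nums.foldl (fun m r => max m r.length) 0

theorem pvFoldAppend {α β : Type} (l : List α) (g : α → List β) :
    ∀ acc, l.foldl (fun acc x => acc ++ g x) acc = acc ++ l.flatMap g := by
  induction l with
  | nil => intro acc; simp
  | cons h t ih => intro acc; simp [ih]

theorem pvWalk1_step (nums : List (List Int)) (x y : Int) (hx : 0 ≤ x) :
    pvWalk1 nums x y =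
      (if ((nums.getD x.toNat []).length : Int) > y then [(nums.getD x.toNat []).getD y.toNat 0] else [])
        ++ pvWalk1 nums (x - 1) (y + 1) := by
  rw [pvWalk1]; simp [hx]

theorem pvWalk1_neg (nums : List (List Int)) (x y : Int) (hx : ¬ 0 ≤ x) :
    pvWalk1 nums x y = [] := by
  rw [pvWalk1]; simp [hx]

theorem pvWalk2_step (nums : List (List Int)) (maxc x y : Int) (hx : y < maxc ∧ 0 ≤ x) :
    pvWalk2 nums maxc x y =
      (if ((nums.getD x.toNat []).length : Int) > y then [(nums.getD x.toNat []).getD y.toNat 0] else [])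
        ++ pvWalk2 nums maxc (x - 1) (y + 1) := by
  rw [pvWalk2]; simp [hx.1, hx.2]

theorem pvWalk2_stop (nums : List (List Int)) (maxc x y : Int) (hx : ¬ (y < maxc ∧ 0 ≤ x)) :
    pvWalk2 nums maxc x y = [] := by
  rw [pvWalk2]; simp only [dif_neg hx]

theorem pvCell_head (nums : List (List Int)) (x y : Nat) :
    pvCell nums (x + y) x =
      if y < (nums.getD x []).length then some ((nums.getD x []).getD y 0) else none := by
  unfold pvCell
  have h1 : x ≤ x + y := by omega
  have h2 : x + y - x = y := by omega
  rw [h2]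
  by_cases h : y < (nums.getD x []).length
  · rw [if_pos ⟨h1, h⟩, if_pos h]
  · rw [if_neg (by omega), if_neg h]

theorem pvEmit_eq (nums : List (List Int)) (x y : Nat) :
    (if ((nums.getD x []).length : Int) > (y : Int) then [(nums.getD x []).getD y 0] else [])
      = (pvCell nums (x + y) x).toList := by
  rw [pvCell_head]
  by_cases h : y < (nums.getD x []).length
  · rw [if_pos (by exact_mod_cast h), if_pos h]; rfl
  · rw [if_neg (by exact_mod_cast h), if_neg h]; rfl

-- walk1 from (x, y) collects exactly the cells of diagonal x+y with row ≤ x, top row last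
theorem pvWalk1_eq (nums : List (List Int)) :
    ∀ (x y : Nat), pvWalk1 nums (x : Int) (y : Int) =
      ((List.range (x + 1)).reverse).filterMap (pvCell nums (x + y)) := by
  intro x
  induction x with
  | zero =>
    intro y
    simp only [Nat.cast_zero]
    rw [pvWalk1_step nums 0 (y : Int) (by omega), pvWalk1_neg nums (0 - 1) ((y : Int) + 1) (by omega)]
    have : ((0 : Int)).toNat = (0 : Nat) := rfl
    simp only [this, Int.toNat_natCast]
    rw [pvEmit_eq nums 0 y]
    simp only [Nat.zero_add]
    cases hc : pvCell nums y 0 <;> simp [hc]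
  | succ n ih =>
    intro y
    rw [pvWalk1_step nums ((n + 1 : Nat) : Int) (y : Int) (by positivity)]
    have e1 : ((n + 1 : Nat) : Int) - 1 = (n : Int) := by push_cast; ring
    have e2 : ((y : Nat) : Int) + 1 = ((y + 1 : Nat) : Int) := by push_cast; ring
    rw [e1, e2, ih (y + 1)]
    have e3 : n + (y + 1) = n + 1 + y := by omega
    rw [e3]
    rw [show List.range (n + 1 + 1) = List.range (n + 1) ++ [n + 1] from List.range_succ]
    rw [List.reverse_append]
    simp only [List.reverse_cons, List.reverse_nil, List.nil_append, List.singleton_append,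
      List.filterMap_cons, Int.toNat_natCast]
    rw [pvEmit_eq nums (n + 1) y]
    cases pvCell nums (n + 1 + y) (n + 1) <;> simp [Option.toList]

theorem pvDiag_eq_walk1 (nums : List (List Int)) (d : Nat) (hd : d < nums.length) :
    pvDiag nums d = pvWalk1 nums (d : Int) 0 := by
  rw [show ((0 : Int)) = ((0 : Nat) : Int) from rfl, pvWalk1_eq nums d 0]
  unfold pvDiag
  obtain ⟨k, hk⟩ : ∃ k, nums.length = (d + 1) + k := ⟨nums.length - (d + 1), by omega⟩
  rw [hk, List.range_add, List.reverse_append, List.filterMap_append]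
  have hnil : List.filterMap (pvCell nums d) ((List.range k).map ((d + 1) + ·)).reverse = [] := by
    rw [List.filterMap_eq_nil_iff]
    intro a ha
    rw [List.mem_reverse, List.mem_map] at ha
    obtain ⟨i, _, rfl⟩ := ha
    unfold pvCell
    rw [if_neg (by omega)]
  rw [hnil, List.nil_append]
  rfl

theorem pvWalk2_eq (nums : List (List Int)) (maxc : Nat)
    (hm : ∀ i, (nums.getD i []).length ≤ maxc) :
    ∀ (x y : Nat), pvWalk2 nums (maxc : Int) (x : Int) (y : Int) =
      ((List.range (x + 1)).reverse).filterMap (pvCell nums (x + y)) := by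
  intro x
  induction x with
  | zero =>
    intro y
    by_cases hy : y < maxc
    · simp only [Nat.cast_zero]
      rw [pvWalk2_step nums maxc 0 (y : Int) ⟨by exact_mod_cast hy, by omega⟩,
        pvWalk2_stop nums maxc (0 - 1) ((y : Int) + 1) (by omega)]
      have : ((0 : Int)).toNat = (0 : Nat) := rfl
      simp only [this, Int.toNat_natCast]
      rw [pvEmit_eq nums 0 y]
      simp only [Nat.zero_add]
      cases hc : pvCell nums y 0 <;> simp [hc]
    · rw [pvWalk2_stop nums maxc _ _ (by push_cast; omega)]
      symm
      rw [List.filterMap_eq_nil_iff]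
      intro a ha
      rw [List.mem_reverse, List.mem_range] at ha
      unfold pvCell
      rw [if_neg (by have := hm a; omega)]
  | succ n ih =>
    intro y
    by_cases hy : y < maxc
    · rw [pvWalk2_step nums maxc ((n + 1 : Nat) : Int) (y : Int)
        ⟨by exact_mod_cast hy, by positivity⟩]
      have e1 : ((n + 1 : Nat) : Int) - 1 = (n : Int) := by push_cast; ring
      have e2 : ((y : Nat) : Int) + 1 = ((y + 1 : Nat) : Int) := by push_cast; ring
      rw [e1, e2, ih (y + 1)]
      have e3 : n + (y + 1) = n + 1 + y := by omega
      rw [e3]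
      rw [show List.range (n + 1 + 1) = List.range (n + 1) ++ [n + 1] from List.range_succ]
      rw [List.reverse_append]
      simp only [List.reverse_cons, List.reverse_nil, List.nil_append, List.singleton_append,
        List.filterMap_cons, Int.toNat_natCast]
      rw [pvEmit_eq nums (n + 1) y]
      cases pvCell nums (n + 1 + y) (n + 1) <;> simp [Option.toList]
    · rw [pvWalk2_stop nums maxc _ _ (by push_cast; omega)]
      symm
      rw [List.filterMap_eq_nil_iff]
      intro a ha
      rw [List.mem_reverse, List.mem_range] at ha
      unfold pvCell
      rw [if_neg (by have := hm a; omega)]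

theorem pvDiag_eq_walk2 (nums : List (List Int)) (maxc : Nat)
    (hm : ∀ i, (nums.getD i []).length ≤ maxc)
    (y : Nat) (hrows : 0 < nums.length) :
    pvDiag nums (nums.length - 1 + y) = pvWalk2 nums (maxc : Int) ((nums.length : Int) - 1) (y : Int) := by
  have e : (nums.length : Int) - 1 = ((nums.length - 1 : Nat) : Int) := by
    push_cast [hrows]; omega
  rw [e, pvWalk2_eq nums maxc hm (nums.length - 1) y]
  unfold pvDiag
  rw [show nums.length - 1 + 1 = nums.length by omega]

theorem pvFoldMax_le (l : List (List Int)) : ∀ a : Nat, a ≤ l.foldl (fun m r => max m r.length) a := by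
  induction l with
  | nil => intro a; simp
  | cons h t ih =>
    intro a
    exact le_trans (Nat.le_max_left a h.length) (by simpa using ih (max a h.length))

theorem pvMem_le_foldMax (l : List (List Int)) (r : List Int) (h : r ∈ l) :
    ∀ a : Nat, r.length ≤ l.foldl (fun m r => max m r.length) a := by
  induction l with
  | nil => cases h
  | cons hd t ih =>
    intro a
    rcases List.mem_cons.mp h with rfl | hmem
    · exact le_trans (Nat.le_max_right a r.length) (by simpa using pvFoldMax_le t (max a r.length))
    · simpa using ih hmem (max a hd.length)

theorem pvMaxLen_ge (nums : List (List Int)) : ∀ i, (nums.getD i []).length ≤ pvMaxLen nums := by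
  intro i
  by_cases h : i < nums.length
  · rw [List.getD_eq_getElem nums [] h]
    exact pvMem_le_foldMax nums nums[i] (List.getElem_mem h) 0
  · rw [List.getD_eq_default nums [] (by omega)]
    simp

theorem pvFoldRange (nums : List (List Int)) :
    ∀ (n : Nat), n ≤ nums.length → ∀ (a : Nat),
      (List.range n).foldl
        (fun m row => if (nums.getD row []).length > m then (nums.getD row []).length else m) a
      = (nums.take n).foldl (fun m r => max m r.length) a := by
  intro n
  induction n with
  | zero => intro _ a; simp
  | succ n ih =>
    intro h a
    rw [List.range_succ, List.foldl_append, ih (by omega) a]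
    rw [List.take_succ_eq_append_getElem (by omega : n < nums.length), List.foldl_append]
    simp only [List.foldl_cons, List.foldl_nil]
    rw [List.getD_eq_getElem nums [] (by omega : n < nums.length)]
    split <;> omega

theorem pvMaxLenA (nums : List (List Int)) :
    (List.range nums.length).foldl
      (fun m row => if (nums.getD row []).length > m then (nums.getD row []).length else m) 0
      = pvMaxLen nums := by
  rw [pvFoldRange nums nums.length le_rfl 0, List.take_length]; rfl

-- A as a flatMap of diagonals
theorem pvA_eq (nums : List (List Int)) :
    findDiagonalOrder_v1 nums =
      (List.range nums.length ++ List.range' nums.length (pvMaxLen nums - 1)).flatMap (pvDiag nums) := by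
  by_cases hnil : nums = []
  · subst hnil; rfl
  have hrows : 0 < nums.length := List.length_pos_iff.mpr hnil
  unfold findDiagonalOrder_v1
  simp only [pvMaxLenA]
  rw [pvFoldAppend (List.range nums.length) (fun row => pvWalk1 nums (row : Int) 0) [],
      pvFoldAppend (List.range' 1 (pvMaxLen nums - 1))
        (fun col => pvWalk2 nums ((pvMaxLen nums : Nat) : Int) ((nums.length : Int) - 1) (col : Int)) []]
  simp only [List.nil_append]
  rw [List.flatMap_append]
  congr 1
  · apply List.flatMap_congr
    intro d hd
    exact (pvDiag_eq_walk1 nums d (List.mem_range.mp hd)).symm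
  · rw [List.range'_eq_map_range, List.range'_eq_map_range, List.flatMap_map, List.flatMap_map]
    apply List.flatMap_congr
    intro k _
    have e : nums.length + k = nums.length - 1 + (1 + k) := by omega
    rw [e, pvDiag_eq_walk2 nums (pvMaxLen nums) (pvMaxLen_ge nums) (1 + k) hrows]

theorem pvGetD_replicate (n d : Nat) : (List.replicate n ([] : List Int)).getD d [] = [] := by
  by_cases h : d < n
  · rw [List.getD_eq_getElem _ _ (by simpa using h)]; simp
  · rw [List.getD_eq_default _ _ (by simpa using (by omega : n ≤ d))]

-- inner loop: enumerating one row appends each element to its diagonal's bucket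
theorem pvInner (x : Nat) :
    ∀ (l : List Int) (j : Nat) (j' : Int), j' = (j : Int) →
      ∀ (bs : List (List Int)), x + j + l.length ≤ bs.length →
      (((PySem.List.enumerate l j').foldl
          (fun bs2 p => bs2.set (((x : Int) + p.1)).toNat ((bs2.getD (((x : Int) + p.1)).toNat []) ++ [p.2])) bs).length = bs.length
       ∧ ∀ d : Nat, ((PySem.List.enumerate l j').foldl
          (fun bs2 p => bs2.set (((x : Int) + p.1)).toNat ((bs2.getD (((x : Int) + p.1)).toNat []) ++ [p.2])) bs).getD d []
          = bs.getD d [] ++ (if x + j ≤ d ∧ d - (x + j) < l.length then [l.getD (d - (x + j)) 0] else [])) := by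
  intro l
  induction l with
  | nil =>
    intro j j' hj bs _
    subst hj
    refine ⟨by simp [PySem.List.enumerate_nil], fun d => ?_⟩
    simp only [PySem.List.enumerate_nil, List.foldl_nil, List.length_nil]
    rw [if_neg (by omega), List.append_nil]
  | cons a l ih =>
    intro j j' hj bs hb
    subst hj
    rw [PySem.List.enumerate_cons]
    simp only [List.foldl_cons]
    set bs' := bs.set (((x : Int) + (j : Int))).toNat ((bs.getD (((x : Int) + (j : Int))).toNat []) ++ [a]) with hbs'
    have hxj : (((x : Int) + (j : Int))).toNat = x + j := by omega
    have hlen' : bs'.length = bs.length := by rw [hbs']; exact List.length_set ..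
    have hb' : x + (j + 1) + l.length ≤ bs'.length := by
      rw [hlen']; simp only [List.length_cons] at hb; omega
    obtain ⟨ihlen, ihget⟩ := ih (j + 1) ((j : Int) + 1) (by push_cast; ring) bs' hb'
    refine ⟨by rw [ihlen, hlen'], fun d => ?_⟩
    rw [ihget d]
    have hin : x + j < bs.length := by simp only [List.length_cons] at hb; omega
    have hget' : bs'.getD d [] = if d = x + j then bs.getD d [] ++ [a] else bs.getD d [] := by
      rw [hbs', hxj]
      by_cases hd : d = x + j
      · subst hd
        rw [if_pos rfl, List.getD_eq_getElem _ _ (by rw [List.length_set]; exact hin)]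
        simp
      · rw [if_neg hd]
        by_cases hdl : d < bs.length
        · rw [List.getD_eq_getElem _ _ (by rw [List.length_set]; exact hdl),
            List.getD_eq_getElem _ _ hdl]
          rw [List.getElem_set_ne (by omega)]
        · rw [List.getD_eq_default _ _ (by rw [List.length_set]; omega),
            List.getD_eq_default _ _ (by omega)]
    rw [hget']
    by_cases hd : d = x + j
    · subst hd
      rw [if_pos rfl, if_neg (by omega), if_pos (by simp)]
      simp [List.getD]
    · rw [if_neg hd]
      simp only [List.length_cons]
      by_cases hc : x + j ≤ d ∧ d - (x + j) < l.length + 1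
      · have hc' : x + (j + 1) ≤ d ∧ d - (x + (j + 1)) < l.length := by omega
        rw [if_pos hc', if_pos hc]
        have he : d - (x + j) = (d - (x + (j + 1))) + 1 := by omega
        rw [he]
        rfl
      · rw [if_neg (by omega), if_neg hc]

-- outer loop: folding rows accumulates each diagonal's cells in traversal order
theorem pvOuter (nums : List (List Int)) :
    ∀ (xs : List Nat) (bs : List (List Int)),
      (∀ x ∈ xs, x + (nums.getD x []).length ≤ bs.length) →
      ((xs.foldl
          (fun bs x =>
            (PySem.List.enumerate (nums.getD x []) 0).foldl
              (fun bs2 p => bs2.set (((x : Nat) : Int) + p.1).toNat ((bs2.getD (((x : Nat) : Int) + p.1).toNat []) ++ [p.2])) bs) bs).length = bs.length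
       ∧ ∀ d : Nat, (xs.foldl
          (fun bs x =>
            (PySem.List.enumerate (nums.getD x []) 0).foldl
              (fun bs2 p => bs2.set (((x : Nat) : Int) + p.1).toNat ((bs2.getD (((x : Nat) : Int) + p.1).toNat []) ++ [p.2])) bs) bs).getD d []
          = bs.getD d [] ++ xs.filterMap (fun x => pvCell nums d x)) := by
  intro xs
  induction xs with
  | nil => intro bs _; exact ⟨rfl, fun d => by simp⟩
  | cons x xs ih =>
    intro bs hb
    simp only [List.foldl_cons]
    obtain ⟨hlen, hget⟩ := pvInner x (nums.getD x []) 0 0 (by simp) bs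
      (by simpa using hb x (List.mem_cons_self))
    set bs' := (PySem.List.enumerate (nums.getD x []) 0).foldl
      (fun bs2 p => bs2.set (((x : Nat) : Int) + p.1).toNat ((bs2.getD (((x : Nat) : Int) + p.1).toNat []) ++ [p.2])) bs with hbs'
    obtain ⟨ihlen, ihget⟩ := ih bs' (fun z hz => by rw [hlen]; exact hb z (List.mem_cons_of_mem _ hz))
    refine ⟨by rw [ihlen, hlen], fun d => ?_⟩
    rw [ihget d, hget d, List.filterMap_cons, List.append_assoc]
    congr 1
    unfold pvCell
    by_cases hc : x ≤ d ∧ d - x < (nums.getD x []).length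
    · rw [if_pos (by omega), if_pos hc]
      simp
    · rw [if_neg (by omega), if_neg hc]
      simp

-- B as a flatMap of diagonals
theorem pvB_eq (nums : List (List Int)) :
    findDiagonalOrder_v1_alt nums =
      (List.range (if nums = [] then 0 else nums.length + pvMaxLen nums - 1)).flatMap (pvDiag nums) := by
  by_cases hnil : nums = []
  · subst hnil; rfl
  have hrows : 0 < nums.length := List.length_pos_iff.mpr hnil
  unfold findDiagonalOrder_v1_alt
  simp only [if_neg hnil]
  have hml : nums.foldl (fun m r => max m r.length) 0 = pvMaxLen nums := rfl
  rw [hml]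
  set ndiag := nums.length + pvMaxLen nums - 1 with hnd
  -- rewrite the countdown range as the reverse of an ascending Nat range
  rw [PySem.List.pyRange_neg_one_eq_reverse]
  have e0 : ((-1 : Int)) + 1 = 0 := by ring
  have e1 : ((nums.length : Int) - 1) + 1 = (nums.length : Int) := by ring
  rw [e0, e1]
  rw [PySem.List.pyRange_one]
  simp only [Int.sub_zero, Int.toNat_natCast]
  rw [← List.map_reverse, List.foldl_map]
  have hpg : ∀ (k : Nat), PySem.List.pyGetD nums ((0 : Int) + (k : Nat)) [] = nums.getD k [] := by
    intro k
    rw [Int.zero_add, PySem.List.pyGetD_natCast]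
  have hfun :
      (fun (bs : List (List Int)) (k : Nat) =>
          (PySem.List.enumerate (PySem.List.pyGetD nums ((0 : Int) + (k : Nat)) []) 0).foldl
            (fun bs2 p => bs2.set (((0 : Int) + (k : Nat)) + p.1).toNat ((bs2.getD (((0 : Int) + (k : Nat)) + p.1).toNat []) ++ [p.2])) bs)
      = (fun (bs : List (List Int)) (k : Nat) =>
          (PySem.List.enumerate (nums.getD k []) 0).foldl
            (fun bs2 p => bs2.set (((k : Nat) : Int) + p.1).toNat ((bs2.getD (((k : Nat) : Int) + p.1).toNat []) ++ [p.2])) bs) := by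
    funext bs k
    rw [hpg k]
    simp only [Int.zero_add]
  rw [hfun]
  have hbound : ∀ x ∈ (List.range nums.length).reverse,
      x + (nums.getD x []).length ≤ (List.replicate ndiag ([] : List Int)).length := by
    intro x hx
    rw [List.mem_reverse, List.mem_range] at hx
    rw [List.length_replicate]
    have := pvMaxLen_ge nums x
    omega
  obtain ⟨hlen, hget⟩ := pvOuter nums ((List.range nums.length).reverse)
    (List.replicate ndiag ([] : List Int)) hbound
  set buckets := ((List.range nums.length).reverse).foldl
    (fun bs (k : Nat) =>
      (PySem.List.enumerate (nums.getD k []) 0).foldl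
        (fun bs2 p => bs2.set (((k : Nat) : Int) + p.1).toNat ((bs2.getD (((k : Nat) : Int) + p.1).toNat []) ++ [p.2])) bs)
    (List.replicate ndiag ([] : List Int)) with hbk
  have hblen : buckets.length = ndiag := by rw [hlen, List.length_replicate]
  have hbmap : buckets = (List.range ndiag).map (pvDiag nums) := by
    apply List.ext_getElem
    · rw [hblen]; simp
    · intro i h1 h2
      have hi : i < ndiag := by rw [hblen] at h1; exact h1
      rw [← List.getD_eq_getElem buckets [] h1, hget i, pvGetD_replicate, List.nil_append]
      rw [List.getElem_map, List.getElem_range]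
      rfl
  rw [hbmap, pvFoldAppend ((List.range ndiag).map (pvDiag nums)) (fun b => b) [], List.nil_append,
      List.flatMap_map]

theorem pvDiag_nil (nums : List (List Int)) (h0 : pvMaxLen nums = 0) (d : Nat) :
    pvDiag nums d = [] := by
  unfold pvDiag
  rw [List.filterMap_eq_nil_iff]
  intro x _
  unfold pvCell
  rw [if_neg (by have := pvMaxLen_ge nums x; omega)]

-- ===== VERDICT (by name: the statement is the Claim_ definition above) =====
theorem findDiagonalOrder_v1_spec : Claim_equal_findDiagonalOrder_v1 := by
  intro nums _
  unfold Spec_findDiagonalOrder_v1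
  rw [pvA_eq, pvB_eq]
  by_cases hnil : nums = []
  · subst hnil; simp [pvMaxLen]
  · by_cases h0 : pvMaxLen nums = 0
    · simp only [if_neg hnil]
      have hz : ∀ (l : List Nat), l.flatMap (fun _ => ([] : List Int)) = [] := by
        intro l
        induction l with
        | nil => rfl
        | cons h t ih => simp [ih]
      rw [List.flatMap_congr (g := fun _ => ([] : List Int)) (fun d _ => pvDiag_nil nums h0 d),
          List.flatMap_congr (g := fun _ => ([] : List Int)) (fun d _ => pvDiag_nil nums h0 d),
          hz, hz]
    · have h1 : 1 ≤ pvMaxLen nums := Nat.one_le_iff_ne_zero.mpr h0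
      have he : List.range nums.length ++ List.range' nums.length (pvMaxLen nums - 1)
          = List.range (nums.length + pvMaxLen nums - 1) := by
        rw [List.range'_eq_map_range]
        rw [show nums.length + pvMaxLen nums - 1 = nums.length + (pvMaxLen nums - 1) by omega]
        rw [List.range_add]
      rw [he, if_neg hnil]
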